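-- pv_equiv track=rewrite | github.com/shaquilledavid/Advent_Of_Code | Day 2/Day2.py | protocolAndPasswords
-- ===== SOURCE A (Python) =====
-- def protocolAndPasswords(lst):
--     """ Return a list of passwords and their related protocols"""
--
--     retlst= []
--     if lst == []:
--         return retlst
--     if len(lst) == 1:
--         return retlst + (lst[0].split(':'))
--     else:
--         return protocolAndPasswords([lst[0]]) + protocolAndPasswords(lst[1:])
-- ===== SOURCE B (Python) =====
-- def protocolAndPasswords(lst):
--     """ Return a list of passwords and their related protocols"""
--     result = []
--     for s in lst:
--         result.extend(s.split(':'))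
--     return result
-- ===== Notes on version B (the rewrite author's own statement) =====
-- stated objective: faster
-- what changed: Replaced A's binary recursive split-and-concatenate (recursing on a singleton and on the sliced tail, concatenating results) with a single explicit accumulating loop that extends one result list.
import Mathlib
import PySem

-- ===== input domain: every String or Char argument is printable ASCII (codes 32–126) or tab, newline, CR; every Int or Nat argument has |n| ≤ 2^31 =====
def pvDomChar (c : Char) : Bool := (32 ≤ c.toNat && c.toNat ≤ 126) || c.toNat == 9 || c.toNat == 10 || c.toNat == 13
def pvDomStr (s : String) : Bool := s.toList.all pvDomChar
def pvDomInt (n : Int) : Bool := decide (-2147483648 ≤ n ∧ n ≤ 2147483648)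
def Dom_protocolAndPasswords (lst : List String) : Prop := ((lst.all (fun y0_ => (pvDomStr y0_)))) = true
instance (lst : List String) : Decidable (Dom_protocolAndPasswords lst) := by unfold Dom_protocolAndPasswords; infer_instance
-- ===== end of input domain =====

-- B replaces A's binary recursion with one accumulating loop (simpler decomposition).

-- ===== PORT A =====
def protocolAndPasswords (lst : List String) : List String :=
  match lst with
  | [] => []
  | x :: rest =>
    match rest with
    | [] => [] ++ ((PySem.Str.split? x ":").getD [])
    | y :: ys => protocolAndPasswords [x] ++ protocolAndPasswords (y :: ys)
termination_by lst.length
decreasing_by all_goals simp [List.length]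


-- ===== PORT B =====
def protocolAndPasswords_alt (lst : List String) : List String :=
  lst.foldl (fun result s => result ++ ((PySem.Str.split? s ":").getD [])) []

-- ===== PRECONDITION & SPEC =====
def Spec_protocolAndPasswords (lst : List String) (out : List String) : Prop := out = protocolAndPasswords_alt lst
instance (lst : List String) (out : List String) : Decidable (Spec_protocolAndPasswords lst out) := by unfold Spec_protocolAndPasswords; infer_instance

-- ===== CLAIM (what is proved, stated in full; the proofs are below) =====
def Claim_equal_protocolAndPasswords : Prop := ∀ (lst : List String), Dom_protocolAndPasswords lst → Spec_protocolAndPasswords lst (protocolAndPasswords lst)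

-- ===== LEMMAS AND PROOFS =====

theorem pAP_cons (x : String) (rest : List String) :
    protocolAndPasswords (x :: rest) = ((PySem.Str.split? x ":").getD []) ++ protocolAndPasswords rest := by
  cases rest <;> simp [protocolAndPasswords]

theorem pAP_foldl (lst : List String) (acc : List String) :
    lst.foldl (fun result s => result ++ ((PySem.Str.split? s ":").getD [])) acc = acc ++ protocolAndPasswords lst := by
  induction lst generalizing acc with
  | nil => simp [protocolAndPasswords]
  | cons x rest ih => simp [List.foldl, ih, pAP_cons]

-- ===== VERDICT (by name: the statement is the Claim_ definition above) =====
theorem protocolAndPasswords_spec : Claim_equal_protocolAndPasswords := by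
  intro lst _
  unfold Spec_protocolAndPasswords protocolAndPasswords_alt
  rw [pAP_foldl]
  simp
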